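-- pv_equiv track=rewrite | github.com/OpenCorpora/opencorpora | scripts/oc2conllu/oc2conllu.py | find_token_pos
-- ===== SOURCE A (Python) =====
-- def find_token_pos(source, text, prev):
--     pos, length = prev, 0
--
--     hyp = ' '.join(list(text))
--
--     while source[pos:pos + len(hyp)] != hyp and pos < len(source):
--         pos += 1
--
--     if pos < len(source):
--         length = len(hyp)
--         return pos, length
--
--     return None, None
-- ===== SOURCE B (Python) =====
-- def find_token_pos(source, text, prev):
--     hyp = ' '.join(text)
--     pos = source.find(hyp, prev)
--     if 0 <= pos < len(source):
--         return pos, len(hyp)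
--     return None, None
-- ===== Notes on version B (the rewrite author's own statement) =====
-- stated objective: faster
-- what changed: A's explicit while-loop that re-slices and re-compares source[pos:pos+len(hyp)] at every position is replaced by a single source.find(hyp, prev) call plus a bounds check on the result.
-- outside the precondition, e.g. on find_token_pos('ba', 'b', -2): A returns (-2, 1), B returns (0, 1)
import Mathlib
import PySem

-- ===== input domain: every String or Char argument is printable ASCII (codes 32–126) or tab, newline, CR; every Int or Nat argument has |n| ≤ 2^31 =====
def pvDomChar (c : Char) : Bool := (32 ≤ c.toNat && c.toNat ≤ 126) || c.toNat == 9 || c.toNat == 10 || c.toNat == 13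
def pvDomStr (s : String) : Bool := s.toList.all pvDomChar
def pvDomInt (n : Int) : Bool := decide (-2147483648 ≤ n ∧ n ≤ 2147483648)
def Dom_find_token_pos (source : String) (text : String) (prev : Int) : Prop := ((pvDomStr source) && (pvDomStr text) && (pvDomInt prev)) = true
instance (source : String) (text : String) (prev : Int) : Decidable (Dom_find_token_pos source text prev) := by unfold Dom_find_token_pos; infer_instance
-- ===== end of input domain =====

-- B replaces A's per-position slice-and-compare rescan loop with a single str.find(hyp, prev)
-- call plus a bounds check (objective: faster, idiomatic).

-- ===== PORT A =====
-- the while loop: advance pos until source[pos:pos+len(hyp)] == hyp or pos >= len(source)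
def pvLoopA (s h : List Char) (pos : Int) : Int :=
  if PySem.List.slice s (some pos) (some (pos + (h.length : Int))) ≠ h ∧ pos < (s.length : Int) then
    pvLoopA s h (pos + 1)
  else pos
termination_by ((s.length : Int) - pos).toNat
decreasing_by omega

def find_token_pos (source : String) (text : String) (prev : Int) : Option Int × Option Int :=
  let hyp := PySem.Chars.join [' '] (text.toList.map (fun c => [c]))   -- ' '.join(list(text))
  let pos := pvLoopA source.toList hyp prev
  if pos < (source.toList.length : Int) then (some pos, some (hyp.length : Int)) else (none, none)

-- ===== PORT B =====
def find_token_pos_alt (source : String) (text : String) (prev : Int) : Option Int × Option Int :=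
  let hyp := PySem.Chars.join [' '] (text.toList.map (fun c => [c]))   -- ' '.join(text)
  let pos := PySem.Chars.findFrom source.toList hyp prev               -- source.find(hyp, prev)
  if 0 ≤ pos ∧ pos < (source.toList.length : Int) then (some pos, some (hyp.length : Int)) else (none, none)

-- ===== PRECONDITION & SPEC =====
-- Pre_ restricts prev to the natural domain of start positions, 0 ≤ prev: on negative prev A's
-- Python slice wraparound scans near the END of the source and can return a negative position,
-- which B's clamped find-from-start does not mirror.
def Pre_find_token_pos (source : String) (text : String) (prev : Int) : Prop := 0 ≤ prev
instance (source : String) (text : String) (prev : Int) : Decidable (Pre_find_token_pos source text prev) := by unfold Pre_find_token_pos; infer_instance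

def pvWitness_find_token_pos : String × String × Int := ("a b c", "b", 0)

def Spec_find_token_pos (source : String) (text : String) (prev : Int) (out : Option Int × Option Int) : Prop := out = find_token_pos_alt source text prev
instance (source : String) (text : String) (prev : Int) (out : Option Int × Option Int) : Decidable (Spec_find_token_pos source text prev out) := by unfold Spec_find_token_pos; infer_instance

-- ===== CLAIM (what is proved, stated in full; the proofs are below) =====
def Claim_equal_find_token_pos : Prop := ∀ (source : String) (text : String) (prev : Int), Dom_find_token_pos source text prev → Pre_find_token_pos source text prev → Spec_find_token_pos source text prev (find_token_pos source text prev)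

-- ===== LEMMAS AND PROOFS =====

lemma pv_take_eq_iff_prefix (h X : List Char) : X.take h.length = h ↔ h <+: X := by
  rw [List.prefix_iff_eq_take, eq_comm]

lemma pv_prefix_drop_infix {h X : List Char} {j : ℕ} (hp : h <+: X.drop j) : h <:+: X := by
  rw [← PySem.Chars.isIn_iff_infix, ← PySem.Chars.exists_prefix_drop_iff_isIn]
  exact ⟨j, hp⟩

lemma pv_find_zero_iff (X h : List Char) : PySem.Chars.find X h = 0 ↔ h <+: X := by
  constructor
  · intro h0
    have := (PySem.Chars.find_spec (s := X) (sub := h) (by omega)).1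
    rwa [h0] at this
    
  · intro hp
    have hnn : 0 ≤ PySem.Chars.find X h :=
      (PySem.Chars.find_nonneg_iff X h).mpr (pv_prefix_drop_infix (j := 0) (by simpa using hp))
    have hs := PySem.Chars.find_spec (s := X) (sub := h) hnn
    by_contra hne
    have hpos : 0 < (PySem.Chars.find X h).toNat := by omega
    exact hs.2 0 hpos (by simpa using hp)

lemma pv_find_succ (s h : List Char) (k : ℕ) (hnp : ¬ h <+: s.drop k) :
    PySem.Chars.find (s.drop k) h =
      if PySem.Chars.find (s.drop (k + 1)) h = -1 then -1
      else 1 + PySem.Chars.find (s.drop (k + 1)) h := by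
  have hdd : ∀ j : ℕ, (s.drop k).drop (j + 1) = (s.drop (k + 1)).drop j := by
    intro j; rw [List.drop_drop, List.drop_drop]; ring_nf
  by_cases hY : PySem.Chars.find (s.drop (k + 1)) h = -1
  · rw [if_pos hY, PySem.Chars.find_eq_neg_one_iff]
    rw [PySem.Chars.find_eq_neg_one_iff] at hY
    intro hinf
    have : ∃ j, h <+: (s.drop k).drop j := by
      rw [PySem.Chars.exists_prefix_drop_iff_isIn, PySem.Chars.isIn_iff_infix]; exact hinf
    obtain ⟨j, hj⟩ := this
    cases j with
    | zero => exact hnp (by simpa using hj)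
    | succ j' =>
        rw [hdd j'] at hj
        exact hY (pv_prefix_drop_infix hj)
  · rw [if_neg hY]
    have hYnn : 0 ≤ PySem.Chars.find (s.drop (k + 1)) h := by
      have := PySem.Chars.neg_one_le_find (s.drop (k + 1)) h; omega
    set r : ℕ := (PySem.Chars.find (s.drop (k + 1)) h).toNat with hr
    have hrY : PySem.Chars.find (s.drop (k + 1)) h = (r : Int) := by omega
    obtain ⟨hYpre, hYmin⟩ := PySem.Chars.find_spec (s := s.drop (k + 1)) (sub := h) hYnn
    -- h is a prefix of (s.drop k).drop (r+1)
    have hpre : h <+: (s.drop k).drop (r + 1) := by rw [hdd r, hr]; exact hYpre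
    have hXnn : 0 ≤ PySem.Chars.find (s.drop k) h :=
      (PySem.Chars.find_nonneg_iff _ _).mpr (pv_prefix_drop_infix hpre)
    obtain ⟨hXpre, hXmin⟩ := PySem.Chars.find_spec (s := s.drop k) (sub := h) hXnn
    have hple : (PySem.Chars.find (s.drop k) h).toNat ≤ r + 1 := by
      by_contra hgt
      exact hXmin (r + 1) (by omega) hpre
    have hpne : (PySem.Chars.find (s.drop k) h).toNat ≠ 0 := by
      intro h0
      rw [h0] at hXpre
      exact hnp (by simpa using hXpre)
    have hge : r + 1 ≤ (PySem.Chars.find (s.drop k) h).toNat := by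
      by_contra hlt
      obtain ⟨p', hps⟩ : ∃ p', (PySem.Chars.find (s.drop k) h).toNat = p' + 1 :=
        ⟨(PySem.Chars.find (s.drop k) h).toNat - 1, by omega⟩
      rw [hps, hdd p'] at hXpre
      exact hYmin p' (by omega) hXpre
    omega

lemma pv_loopA_eq (s h : List Char) :
    ∀ n k, k ≤ s.length → s.length - k = n →
      pvLoopA s h (k : Int) =
        if PySem.Chars.find (s.drop k) h = -1 then (s.length : Int)
        else (k : Int) + PySem.Chars.find (s.drop k) h := by
  intro n
  induction n with
  | zero =>
      intro k hk hn
      have hk' : k = s.length := by omega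
      subst hk'
      rw [pvLoopA]
      have hlt : ¬ ((s.length : Int) < (s.length : Int)) := by omega
      rw [if_neg (by tauto)]
      simp only [List.drop_length]
      have hle := PySem.Chars.find_le_length ([] : List Char) h
      have hge := PySem.Chars.neg_one_le_find ([] : List Char) h
      simp only [List.length_nil] at hle
      split_ifs <;> omega
  | succ n ih =>
      intro k hk hn
      have hklt : k < s.length := by omega
      rw [pvLoopA]
      have hslice : PySem.List.slice s (some (k : Int)) (some ((k : Int) + (h.length : Int))) =
          (s.drop k).take h.length := by
        simpa using PySem.List.slice_natCast_add s k h.length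
      by_cases hpre : h <+: s.drop k
      · have heq : PySem.List.slice s (some (k : Int)) (some ((k : Int) + (h.length : Int))) = h := by
          rw [hslice, pv_take_eq_iff_prefix]; exact hpre
        rw [if_neg (by simp [heq])]
        have hf0 : PySem.Chars.find (s.drop k) h = 0 := (pv_find_zero_iff _ _).mpr hpre
        rw [hf0]
        norm_num
      · have hne : PySem.List.slice s (some (k : Int)) (some ((k : Int) + (h.length : Int))) ≠ h := by
          rw [hslice]; intro hEq; exact hpre ((pv_take_eq_iff_prefix h (s.drop k)).mp hEq)
        rw [if_pos ⟨hne, by omega⟩]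
        have hcast : (k : Int) + 1 = ((k + 1 : ℕ) : Int) := by push_cast; ring
        rw [hcast, ih (k + 1) (by omega) (by omega)]
        rw [pv_find_succ s h k hpre]
        by_cases hY : PySem.Chars.find (s.drop (k + 1)) h = -1
        · simp [hY]
        · rw [if_neg hY, if_neg (by have := PySem.Chars.neg_one_le_find (s.drop (k+1)) h; omega)]
          rw [if_neg (by have := PySem.Chars.neg_one_le_find (s.drop (k+1)) h; omega)]
          push_cast
          ring

lemma pv_findFrom_past (s sub : List Char) (k : Int) (h0 : 0 ≤ k) (hk : (s.length : Int) < k) :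
    PySem.Chars.findFrom s sub k = -1 := by
  simp only [PySem.Chars.findFrom]
  split_ifs <;> omega

-- ===== VERDICT (by name: the statement is the Claim_ definition above) =====
theorem find_token_pos_spec : Claim_equal_find_token_pos := by
  intro source text prev _ hpre
  unfold Pre_find_token_pos at hpre
  simp only [Spec_find_token_pos, find_token_pos, find_token_pos_alt]
  set s : List Char := source.toList with hs
  set h : List Char := PySem.Chars.join [' '] (text.toList.map (fun c => [c])) with hh
  by_cases hbig : (s.length : Int) < prev
  · -- prev past the end: both miss
    have hcond : ¬(PySem.List.slice s (some prev) (some (prev + (h.length : Int))) ≠ h ∧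
        prev < (s.length : Int)) := fun hc => absurd hc.2 (by omega)
    rw [pvLoopA, if_neg hcond, pv_findFrom_past s h prev hpre hbig]
    rw [if_neg (by omega), if_neg (fun hc => absurd hc.1 (by omega))]
  · -- prev within the string
    set k : ℕ := prev.toNat with hk
    have hkprev : prev = (k : Int) := by omega
    have hkle : k ≤ s.length := by omega
    rw [hkprev, pv_loopA_eq s h (s.length - k) k hkle rfl,
      PySem.Chars.findFrom_natCast s h k hkle]
    by_cases hf : PySem.Chars.find (s.drop k) h = -1
    · rw [if_pos hf, if_pos hf, if_neg (by omega), if_neg (fun hc => absurd hc.1 (by omega))]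
    · have hnn : 0 ≤ PySem.Chars.find (s.drop k) h := by
        have := PySem.Chars.neg_one_le_find (s.drop k) h; omega
      rw [if_neg hf, if_neg hf]
      by_cases hlt : (k : Int) + PySem.Chars.find (s.drop k) h < (s.length : Int)
      · rw [if_pos hlt, if_pos ⟨by omega, hlt⟩]
      · rw [if_neg hlt, if_neg (fun hc => hlt hc.2)]
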